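-- pv_equiv track=rewrite | github.com/OscarVesterink/ordina_assessment | exercises/exercise2.py | split_transaction_log
-- ===== SOURCE A (Python) =====
-- def split_transaction_log(raw_transaction_log: str):
--     """ A function to refined the raw transaction log, from a (multiline) string to an array with the following structure:
--
--     total_log_array = [
--         [CIN, Direction, Amount],
--         ...
--     ]
--
--     """
--     total_log_array = []
--     sub_log_array = []
--
--     # Split multiline string into an array split by breakspace
--     split_log = raw_transaction_log.split(' ')
--     # Construct the total_log_array as displayed in explanation seen above
--     for item in split_log:
--         sub_log_array.append(item)
--
--         if len(sub_log_array) == 3: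
--             total_log_array.append(sub_log_array)
--             sub_log_array = []
--
--     return total_log_array
-- ===== SOURCE B (Python) =====
-- def split_transaction_log(raw_transaction_log: str):
--     """Group the space-split tokens into triples via the shared-iterator idiom;
--     zip stops at the shortest, so a trailing incomplete triple is discarded."""
--     tokens = iter(raw_transaction_log.split(' '))
--     return [list(g) for g in zip(tokens, tokens, tokens)]
-- ===== Notes on version B (the rewrite author's own statement) =====
-- stated objective: idiomatic
-- what changed: Replaces the explicit accumulator/flush loop with the shared-iterator zip idiom that consumes three tokens at a time and naturally drops a trailing incomplete triple.
import Mathlib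
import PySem

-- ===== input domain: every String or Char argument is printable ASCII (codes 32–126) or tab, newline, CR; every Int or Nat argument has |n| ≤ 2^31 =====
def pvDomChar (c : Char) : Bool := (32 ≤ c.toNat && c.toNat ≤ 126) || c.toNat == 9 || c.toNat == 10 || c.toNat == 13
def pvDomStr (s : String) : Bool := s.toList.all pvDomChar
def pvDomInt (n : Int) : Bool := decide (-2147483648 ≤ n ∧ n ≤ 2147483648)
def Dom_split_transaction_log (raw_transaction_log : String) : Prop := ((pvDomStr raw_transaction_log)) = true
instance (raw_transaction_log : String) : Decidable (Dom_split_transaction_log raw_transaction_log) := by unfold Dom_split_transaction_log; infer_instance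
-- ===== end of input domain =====

-- B replaces A's accumulator/flush loop with the shared-iterator zip idiom (take three tokens
-- at a time, drop a trailing incomplete triple); same cost, more idiomatic.

-- ===== PORT A =====
-- the loop body: append item to sub_log_array, flush into total_log_array at length 3
def pvStepA (st : List (List String) × List String) (item : String) :
    List (List String) × List String :=
  let sub := st.2 ++ [item]
  if sub.length == 3 then (st.1 ++ [sub], []) else (st.1, sub)

def split_transaction_log (raw_transaction_log : String) : List (List String) :=
  let split_log := (PySem.Str.split? raw_transaction_log " ").getD []  -- sep " " ≠ "", so split? is some
  (split_log.foldl pvStepA ([], [])).1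

-- ===== PORT B =====
-- zip(t, t, t) on a shared iterator: pull three elements per output triple, stop when < 3 remain
def pvZip3 : List String → List (List String)
  | a :: b :: c :: rest => [a, b, c] :: pvZip3 rest
  | _ => []

def split_transaction_log_alt (raw_transaction_log : String) : List (List String) :=
  pvZip3 ((PySem.Str.split? raw_transaction_log " ").getD [])  -- sep " " is nonempty, so split? is some

-- ===== PRECONDITION & SPEC =====
def Spec_split_transaction_log (raw_transaction_log : String) (out : List (List String)) : Prop := out = split_transaction_log_alt raw_transaction_log
instance (raw_transaction_log : String) (out : List (List String)) : Decidable (Spec_split_transaction_log raw_transaction_log out) := by unfold Spec_split_transaction_log; infer_instance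

-- ===== CLAIM (what is proved, stated in full; the proofs are below) =====
def Claim_equal_split_transaction_log : Prop := ∀ (raw_transaction_log : String), Dom_split_transaction_log raw_transaction_log → Spec_split_transaction_log raw_transaction_log (split_transaction_log raw_transaction_log)

-- ===== LEMMAS AND PROOFS =====

-- the leftover partial group A's loop holds at the end (never emitted)
def pvRem3 : List String → List String
  | _ :: _ :: _ :: rest => pvRem3 rest
  | l => l

theorem pvFoldA_eq (l : List String) (total : List (List String)) :
    l.foldl pvStepA (total, []) = (total ++ pvZip3 l, pvRem3 l) := by
  match l with
  | [] => simp [pvZip3, pvRem3]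
  | [a] => simp [List.foldl, pvStepA, pvZip3, pvRem3]
  | [a, b] => simp [List.foldl, pvStepA, pvZip3, pvRem3]
  | a :: b :: c :: rest =>
    have ih := pvFoldA_eq rest (total ++ [[a, b, c]])
    simp only [List.foldl, pvStepA, List.nil_append, List.length_cons,
      List.length_nil] at *
    norm_num
    rw [ih]
    simp [pvZip3, pvRem3]

-- ===== VERDICT (by name: the statement is the Claim_ definition above) =====
theorem split_transaction_log_spec : Claim_equal_split_transaction_log := by
  intro raw _
  unfold Spec_split_transaction_log split_transaction_log split_transaction_log_alt
  show (List.foldl pvStepA ([], []) _).1 = _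
  rw [pvFoldA_eq]
  simp
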